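-- pv_equiv track=rewrite | github.com/chenhx59/TAMP | plan_generator/utils.py | locate_pred_in_state
-- ===== SOURCE A (Python) =====
-- def locate_pred_in_state(pred, state):
--     '''
--     pred be like (ON block1 block2)
--     '''
--     idx_list = []
--     for idx, item in enumerate(state):
--         if item == pred:
--             idx_list.append(idx)
--     # assert len(idx_list) < 2
--     if len(idx_list) > 1:
--         return -2
--     if len(idx_list) == 0:
--         return -1
--     return idx_list[0]
-- ===== SOURCE B (Python) =====
-- def locate_pred_in_state(pred, state):
--     '''
--     pred be like (ON block1 block2)
--     '''
--     def scan(i):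
--         # index of the first match at position >= i, or -1; stops at the first hit
--         while i < len(state) and state[i] != pred:
--             i += 1
--         return i if i < len(state) else -1
--     first = scan(0)
--     if first < 0:
--         return -1
--     return -2 if scan(first + 1) >= 0 else first
-- ===== Notes on version B (the rewrite author's own statement) =====
-- stated objective: alternative
-- what changed: Replaces A's single full pass that accumulates a list of all matching indices with two short-circuiting locate scans: find the first match, then probe the rest for a second match, stopping at the first hit in each scan.
import Mathlib
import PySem

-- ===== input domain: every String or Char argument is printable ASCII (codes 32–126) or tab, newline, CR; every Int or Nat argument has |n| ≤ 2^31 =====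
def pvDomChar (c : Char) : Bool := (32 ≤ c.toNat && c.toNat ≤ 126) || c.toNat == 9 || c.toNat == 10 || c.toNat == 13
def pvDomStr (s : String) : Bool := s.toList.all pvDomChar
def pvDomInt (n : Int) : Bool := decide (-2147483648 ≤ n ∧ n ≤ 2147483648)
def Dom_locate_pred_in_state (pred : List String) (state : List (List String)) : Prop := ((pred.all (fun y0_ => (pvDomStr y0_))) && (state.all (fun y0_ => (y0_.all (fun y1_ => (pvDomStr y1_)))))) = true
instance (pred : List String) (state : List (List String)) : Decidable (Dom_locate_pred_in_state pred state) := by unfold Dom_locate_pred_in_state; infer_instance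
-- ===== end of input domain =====

-- B replaces A's index-accumulating full pass with two short-circuiting locate scans (find first match, then probe for a second); alternative decomposition, same O(n).


-- ===== PORT A =====
-- literal port: collect matching indices via enumerate, then decide on the list's length
def locate_pred_in_state (pred : List String) (state : List (List String)) : Int :=
  let idx_list : List Int :=
    (PySem.List.enumerate state).foldl
      (fun acc p => if p.2 == pred then acc ++ [p.1] else acc) []
  if idx_list.length > 1 then -2
  else if idx_list.length == 0 then -1
  else idx_list.headD 0   -- idx_list[0]; the list is nonempty on this branch

-- ===== PORT B =====
-- the inner `scan` while-loop of Source B: first match at position ≥ i, or -1; stops at the first hit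
def pvScan (pred : List String) (state : List (List String)) (i : Nat) : Int :=
  if h : i < state.length then
    if state[i] == pred then (i : Int)
    else pvScan pred state (i + 1)
  else -1
termination_by state.length - i

def locate_pred_in_state_alt (pred : List String) (state : List (List String)) : Int :=
  let first := pvScan pred state 0
  if first < 0 then -1
  else if pvScan pred state (first.toNat + 1) ≥ 0 then -2 else first
  -- first ≥ 0 on this branch, so first.toNat is exactly Python's first + 1

-- ===== PRECONDITION & SPEC =====
def Spec_locate_pred_in_state (pred : List String) (state : List (List String)) (out : Int) : Prop := out = locate_pred_in_state_alt pred state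
instance (pred : List String) (state : List (List String)) (out : Int) : Decidable (Spec_locate_pred_in_state pred state out) := by unfold Spec_locate_pred_in_state; infer_instance

-- ===== CLAIM (what is proved, stated in full; the proofs are below) =====
def Claim_equal_locate_pred_in_state : Prop := ∀ (pred : List String) (state : List (List String)), Dom_locate_pred_in_state pred state → Spec_locate_pred_in_state pred state (locate_pred_in_state pred state)

-- ===== LEMMAS AND PROOFS =====

-- A's collected index list, as a filterMap over enumerate
theorem pv_collect_eq (pred : List String) (s : List (List String)) (i : Int) (acc : List Int) :
    (PySem.List.enumerate s i).foldl (fun acc p => if p.2 == pred then acc ++ [p.1] else acc) acc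
      = acc ++ (PySem.List.enumerate s i).filterMap (fun p => if p.2 == pred then some p.1 else none) := by
  induction s generalizing i acc with
  | nil => simp [PySem.List.enumerate_nil]
  | cons x xs ih =>
      simp only [PySem.List.enumerate_cons, List.foldl_cons, List.filterMap_cons]
      by_cases h : (x == pred) = true
      · rw [if_pos h, if_pos h, ih, List.append_assoc]; rfl
      · rw [if_neg h, if_neg h, ih]

-- Its length is the count
theorem pv_len_eq (pred : List String) (s : List (List String)) (i : Int) :
    ((PySem.List.enumerate s i).filterMap (fun p => if p.2 == pred then some p.1 else none)).length
      = s.count pred := by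
  induction s generalizing i with
  | nil => simp [PySem.List.enumerate_nil]
  | cons x xs ih =>
      simp only [PySem.List.enumerate_cons, List.filterMap_cons, List.count_cons]
      by_cases h : (x == pred) = true
      · have hx : x = pred := beq_iff_eq.mp h
        rw [if_pos h, List.length_cons, ih]; simp [hx]
      · have hx : x ≠ pred := fun e => h (beq_iff_eq.mpr e)
        rw [if_neg h, ih]; simp [hx]

-- Its head is i + the first index of pred
theorem pv_head_eq (pred : List String) (s : List (List String)) (i : Int) :
    ((PySem.List.enumerate s i).filterMap (fun p => if p.2 == pred then some p.1 else none)).head?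
      = (PySem.List.index? s pred).map (fun k : Nat => i + (k : Int)) := by
  induction s generalizing i with
  | nil =>
      rw [PySem.List.index?_eq_idxOf?]
      simp [PySem.List.enumerate_nil]
  | cons x xs ih =>
      simp only [PySem.List.enumerate_cons, List.filterMap_cons]
      by_cases h : (x == pred) = true
      · have hx : x = pred := beq_iff_eq.mp h
        subst hx
        rw [PySem.List.index?_cons_self, if_pos h]; simp
      · have hx : x ≠ pred := fun e => h (beq_iff_eq.mpr e)
        rw [PySem.List.index?_cons_of_ne xs hx, if_neg h, ih]
        cases PySem.List.index? xs pred with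
        | none => rfl
        | some k => simp only [Option.map_some, Option.some.injEq]; push_cast; ring

-- B's scan, characterised by the first index of pred in the dropped suffix
theorem pvScan_eq (pred : List String) (state : List (List String)) (i : Nat) :
    pvScan pred state i
      = match PySem.List.index? (state.drop i) pred with
        | some k => ((i + k : Nat) : Int)
        | none => -1 := by
  by_cases h : i < state.length
  · rw [pvScan]
    have hdrop : state.drop i = state[i] :: state.drop (i + 1) :=
      (List.drop_eq_getElem_cons h)
    by_cases hx : (state[i] == pred) = true
    · have : state[i] = pred := beq_iff_eq.mp hx
      rw [dif_pos h, if_pos hx, hdrop, this, PySem.List.index?_cons_self]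
      simp
    · have hne : state[i] ≠ pred := fun e => hx (beq_iff_eq.mpr e)
      rw [dif_pos h, if_neg hx, pvScan_eq pred state (i + 1), hdrop,
        PySem.List.index?_cons_of_ne _ hne]
      cases PySem.List.index? (state.drop (i + 1)) pred with
      | none => rfl
      | some k => simp only [Option.map_some]; norm_num; push_cast; ring
  · rw [pvScan, dif_neg h]
    rw [List.drop_eq_nil_of_le (by omega), PySem.List.index?_eq_idxOf?]
    rfl
termination_by state.length - i

-- count = 1 + count of the suffix after the first occurrence
theorem pv_count_split (pred : List String) (s : List (List String)) (k : Nat)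
    (h : PySem.List.index? s pred = some k) :
    s.count pred = 1 + (s.drop (k + 1)).count pred := by
  induction s generalizing k with
  | nil => rw [PySem.List.index?_eq_idxOf?] at h; simp at h
  | cons x xs ih =>
      by_cases hx : x = pred
      · subst hx
        rw [PySem.List.index?_cons_self] at h
        obtain rfl : k = 0 := (Option.some.inj h).symm
        simp [List.count_cons]; omega
      · rw [PySem.List.index?_cons_of_ne xs hx] at h
        cases hk : PySem.List.index? xs pred with
        | none => rw [hk] at h; simp at h
        | some k' =>
            rw [hk] at h
            simp only [Option.map_some, Option.some.injEq] at h
            subst h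
            have := ih k' hk
            simp only [List.count_cons, List.drop_succ_cons] at *
            simpa [hx] using this

-- ===== VERDICT (by name: the statement is the Claim_ definition above) =====
theorem locate_pred_in_state_spec : Claim_equal_locate_pred_in_state := by
  unfold Claim_equal_locate_pred_in_state
  intro pred state _
  unfold Spec_locate_pred_in_state locate_pred_in_state locate_pred_in_state_alt
  simp only [pv_collect_eq, List.nil_append, pvScan_eq, List.drop_zero]
  cases hk : PySem.List.index? state pred with
  | none =>
      -- no occurrence: A's list is empty, B's first scan is -1
      have hmem : pred ∉ state := Iff.mp (PySem.List.index?_eq_none_iff state pred) hk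
      have hc : state.count pred = 0 := List.count_eq_zero.mpr hmem
      have hL := pv_len_eq pred state 0
      rw [hc] at hL
      have hE : (PySem.List.enumerate state 0).filterMap
          (fun p => if p.2 == pred then some p.1 else none) = [] :=
        List.length_eq_zero_iff.mp hL
      rw [hE]
      norm_num
  | some k =>
      have hh := pv_head_eq pred state 0
      rw [hk] at hh
      simp only [Option.map_some, zero_add] at hh
      have hL := pv_len_eq pred state 0
      have hsplit := pv_count_split pred state k hk
      simp only [Int.toNat_natCast, Nat.zero_add]
      cases h2 : PySem.List.index? (state.drop (k + 1)) pred with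
      | none =>
          -- exactly one occurrence
          have hmem2 : pred ∉ state.drop (k + 1) := Iff.mp (PySem.List.index?_eq_none_iff (state.drop (k+1)) pred) h2
          have hc2 : (state.drop (k + 1)).count pred = 0 := List.count_eq_zero.mpr hmem2
          have hc : state.count pred = 1 := by omega
          rw [hc] at hL
          rcases hE : (PySem.List.enumerate state 0).filterMap
              (fun p => if p.2 == pred then some p.1 else none) with _ | ⟨a, t⟩
          · rw [hE] at hL; simp at hL
          · rw [hE] at hh hL
            simp only [List.head?_cons] at hh
            have ha : a = (k : Int) := Option.some.inj hh
            have ht : t = [] := by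
              simp only [List.length_cons] at hL
              exact List.length_eq_zero_iff.mp (by omega)
            rw [hE, ha, ht]
            norm_num [Int.natCast_nonneg]
      | some k2 =>
          -- at least two occurrences
          have hmem2 : pred ∈ state.drop (k + 1) :=
            Iff.mp (PySem.List.index?_isSome_iff (state.drop (k+1)) pred) (by rw [h2]; rfl)
          have hc2 : 0 < (state.drop (k + 1)).count pred := List.count_pos_iff.mpr hmem2
          have hc : 1 < state.count pred := by omega
          rw [← hL] at hc
          rw [if_pos (by exact_mod_cast hc)]
          have hnk : ¬ ((k : Int) < 0) := by omega
          rw [if_neg hnk, if_pos (by simp; positivity)]
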